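-- pv_equiv track=rewrite | github.com/Mokotem/Oslets | Oslets.py | retirerDe
-- ===== SOURCE A (Python) =====
-- def retirerDe (colonne, de): # Romain
--     """'retirerDe (colonne, de)' Retire tous les dés similaire à 'de' dans la colonne 'colonne'."""
--     col = list(colonne)
--     for i in [0, 0, 0]:
--         for c in col:
--             if (c == de):
--                 col.pop(col.index(c))
--                 break
--                 # Ici on utilise break, car la taille de la liste parcourue a été modifié ('col.pop()').
--                 # Pour ne pas faire d'erreur, on sort de la boucle et on reparcoure la nouvelle.
--     while len(col) < 3:col.append(0)
--     return col
-- ===== SOURCE B (Python) =====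
-- def retirerDe(colonne, de):
--     """Single counted pass: skip up to 3 elements equal to de, then pad to length 3 with zeros."""
--     res = []
--     removed = 0
--     for c in colonne:
--         if c == de and removed < 3:
--             removed += 1
--         else:
--             res.append(c)
--     res += [0] * (3 - len(res))
--     return res
-- ===== Notes on version B (the rewrite author's own statement) =====
-- stated objective: simpler
-- what changed: Replaces A's three repeated scan/index/pop passes and append-while loop with a single counted traversal that skips up to three matches, then pads with a computed zero block.
import Mathlib
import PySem

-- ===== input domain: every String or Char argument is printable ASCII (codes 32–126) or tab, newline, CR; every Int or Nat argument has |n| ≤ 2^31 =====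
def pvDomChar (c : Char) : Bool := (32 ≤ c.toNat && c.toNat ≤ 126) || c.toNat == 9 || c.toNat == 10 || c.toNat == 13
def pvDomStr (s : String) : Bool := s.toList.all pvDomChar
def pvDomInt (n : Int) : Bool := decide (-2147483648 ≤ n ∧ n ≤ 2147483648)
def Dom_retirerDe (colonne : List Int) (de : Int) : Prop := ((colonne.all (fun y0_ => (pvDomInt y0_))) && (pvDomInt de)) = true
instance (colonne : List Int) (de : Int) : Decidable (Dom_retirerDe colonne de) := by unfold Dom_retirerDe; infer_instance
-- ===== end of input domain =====

-- B makes one counted pass over the list instead of A's three scan/index/pop rounds; return values proved equal.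

-- ===== PORT A =====
-- inner 'for c in col: if c == de: col.pop(col.index(c)); break' — scans `pending`
-- (a snapshot of col), on the first match pops col at col.index(c) and stops.
def pvInnerFor (col : List Int) (pending : List Int) (de : Int) : List Int :=
  match pending with
  | [] => col
  | c :: rest =>
    if c = de then
      match PySem.List.index? col c with
      | some i =>
        match PySem.List.pop? col (i : Int) with
        | some p => p.2
        | none => col   -- unreachable: index? returns an in-range index
      | none => col     -- unreachable: c was read from col
    else pvInnerFor col rest de

-- 'while len(col) < 3: col.append(0)'
def pvPadWhile (col : List Int) : List Int :=
  if col.length < 3 then pvPadWhile (col ++ [0]) else col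
termination_by 3 - col.length
decreasing_by simp; omega

def retirerDe (colonne : List Int) (de : Int) : List Int :=
  pvPadWhile (([0, 0, 0] : List Int).foldl (fun col _ => pvInnerFor col col de) colonne)

-- ===== PORT B =====
-- single pass with a removal counter
def pvAltScan : List Int → Int → Nat → List Int
  | [], _, _ => []
  | c :: rest, de, removed =>
    if c = de ∧ removed < 3 then pvAltScan rest de (removed + 1)
    else c :: pvAltScan rest de removed

def retirerDe_alt (colonne : List Int) (de : Int) : List Int :=
  let res := pvAltScan colonne de 0
  res ++ List.replicate (3 - res.length) 0

-- ===== PRECONDITION & SPEC =====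
def Spec_retirerDe (colonne : List Int) (de : Int) (out : List Int) : Prop := out = retirerDe_alt colonne de
instance (colonne : List Int) (de : Int) (out : List Int) : Decidable (Spec_retirerDe colonne de out) := by unfold Spec_retirerDe; infer_instance

-- ===== CLAIM (what is proved, stated in full; the proofs are below) =====
def Claim_equal_retirerDe : Prop := ∀ (colonne : List Int) (de : Int), Dom_retirerDe colonne de → Spec_retirerDe colonne de (retirerDe colonne de)

-- ===== LEMMAS AND PROOFS =====

-- remove the first occurrence of `de` (identity if absent): common reference point
def pvErase : List Int → Int → List Int
  | [], _ => []
  | c :: rest, de => if c = de then rest else c :: pvErase rest de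

theorem pvInnerFor_eq_erase_aux (de : Int) (pending : List Int) :
    ∀ pre : List Int, (∀ x ∈ pre, x ≠ de) →
      pvInnerFor (pre ++ pending) pending de = pre ++ pvErase pending de := by
  induction pending with
  | nil => intro pre _; simp [pvInnerFor, pvErase]
  | cons c rest ih =>
    intro pre hpre
    by_cases hc : c = de
    · subst hc
      have hidx : PySem.List.index? (pre ++ c :: rest) c = some pre.length := by
        rw [PySem.List.index?_eq_some_iff]
        exact ⟨pre, rest, rfl, rfl, fun hm => hpre c hm rfl⟩
      have hlen : pre.length < (pre ++ c :: rest).length := by simp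
      have hpop := PySem.List.pop?_natCast (pre ++ c :: rest) pre.length hlen
      simp only [pvInnerFor, hidx, hpop, pvErase]
      simp [List.eraseIdx_append_of_length_le (le_refl pre.length)]
    · have : pre ++ c :: rest = (pre ++ [c]) ++ rest := by simp
      simp only [pvInnerFor, if_neg hc, pvErase]
      rw [this, ih (pre ++ [c]) (by intro x hx; rcases List.mem_append.1 hx with h | h
                                    · exact hpre x h
                                    · simp at h; subst h; exact hc)]
      simp

theorem pvInnerFor_eq_erase (col : List Int) (de : Int) :
    pvInnerFor col col de = pvErase col de := by
  simpa using pvInnerFor_eq_erase_aux de col [] (by simp)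

theorem pvAltScan_step (de : Int) (col : List Int) (r : Nat) (hr : r < 3) :
    pvAltScan col de r = pvAltScan (pvErase col de) de (r + 1) := by
  induction col with
  | nil => simp [pvAltScan, pvErase]
  | cons c rest ih =>
    by_cases hc : c = de
    · simp [pvAltScan, pvErase, hc, hr]
    · simp [pvAltScan, pvErase, hc, ih]

theorem pvAltScan_three (de : Int) (col : List Int) :
    pvAltScan col de 3 = col := by
  induction col with
  | nil => rfl
  | cons c rest ih => simp [pvAltScan, ih]

theorem pvPadWhile_eq (col : List Int) :
    pvPadWhile col = col ++ List.replicate (3 - col.length) 0 := by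
  rcases col with _ | ⟨a, _ | ⟨b, _ | ⟨c, t⟩⟩⟩
  · rw [pvPadWhile]; simp
    rw [pvPadWhile]; simp
    rw [pvPadWhile]; simp
    rw [pvPadWhile]; simp
  · rw [pvPadWhile]; simp
    rw [pvPadWhile]; simp
    rw [pvPadWhile]; simp
  · rw [pvPadWhile]; simp
    rw [pvPadWhile]; simp
  · rw [pvPadWhile]; simp

-- ===== VERDICT (by name: the statement is the Claim_ definition above) =====
theorem retirerDe_spec : Claim_equal_retirerDe := by
  intro colonne de _
  unfold Spec_retirerDe retirerDe retirerDe_alt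
  simp only [List.foldl, pvInnerFor_eq_erase]
  rw [pvAltScan_step de colonne 0 (by omega),
      pvAltScan_step de _ 1 (by omega),
      pvAltScan_step de _ 2 (by omega),
      pvAltScan_three]
  exact pvPadWhile_eq _
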